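-- pv_equiv track=rewrite | github.com/nakshatraaditya/financial-crisis-dashboard | app.py | crisis_episodes
-- ===== SOURCE A (Python) =====
-- def crisis_episodes(crisis_years: list[int]) -> list[tuple[int, int]]:
--     # contiguous runs from a list of years
--     if not crisis_years:
--         return []
--     ys = sorted(set(crisis_years))
--     episodes = []
--     start = ys[0]
--     prev = ys[0]
--     for y in ys[1:]:
--         if y == prev + 1:
--             prev = y
--         else:
--             episodes.append((start, prev))
--             start = y
--             prev = y
--     episodes.append((start, prev))
--     return episodes
-- ===== SOURCE B (Python) =====
-- def crisis_episodes(crisis_years: list[int]) -> list[tuple[int, int]]: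
--     # Episodes as zip of run-starts and run-ends: a run starts where the
--     # predecessor is not y-1 and ends where the successor is not y+1.
--     ys = sorted(set(crisis_years))
--     if not ys:
--         return []
--     gaps = [(a, b) for a, b in zip(ys, ys[1:]) if b != a + 1]
--     starts = [ys[0]] + [b for _, b in gaps]
--     ends = [a for a, _ in gaps] + [ys[-1]]
--     return list(zip(starts, ends))
-- ===== Notes on version B (the rewrite author's own statement) =====
-- stated objective: alternative
-- what changed: Replaces A's explicit start/prev state machine with a declarative formulation: pair adjacent elements of the sorted-deduped list, take the gap pairs, and zip run-starts with run-ends.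
import Mathlib
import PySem

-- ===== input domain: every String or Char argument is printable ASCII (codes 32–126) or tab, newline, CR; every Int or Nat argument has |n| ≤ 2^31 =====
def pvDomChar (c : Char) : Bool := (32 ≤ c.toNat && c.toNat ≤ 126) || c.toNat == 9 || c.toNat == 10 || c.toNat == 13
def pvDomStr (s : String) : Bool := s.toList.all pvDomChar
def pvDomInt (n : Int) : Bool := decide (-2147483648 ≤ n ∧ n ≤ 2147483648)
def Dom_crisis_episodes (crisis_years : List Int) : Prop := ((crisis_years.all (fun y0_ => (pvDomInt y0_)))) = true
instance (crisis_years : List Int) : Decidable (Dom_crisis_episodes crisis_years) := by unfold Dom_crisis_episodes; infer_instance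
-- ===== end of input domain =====

-- B replaces A's start/prev state machine by zipping run-starts with run-ends
-- derived from the gap pairs of the sorted-deduped list (objective: alternative).

-- ===== PORT A =====
def crisis_episodes (crisis_years : List Int) : List (Int × Int) :=
  if crisis_years = [] then []
  else
    let ys := PySem.List.sorted (PySem.Set.ofList crisis_years) (fun x => x) false
    match ys with
    | [] => []  -- unreachable: ys is a permutation of the nonempty set of crisis_years
    | y0 :: rest =>
      let st := rest.foldl
        (fun (st : List (Int × Int) × Int × Int) y =>
          if y = st.2.2 + 1 then (st.1, st.2.1, y)
          else (st.1 ++ [(st.2.1, st.2.2)], y, y))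
        ([], y0, y0)
      st.1 ++ [(st.2.1, st.2.2)]

-- ===== PORT B =====
def crisis_episodes_alt (crisis_years : List Int) : List (Int × Int) :=
  let ys := PySem.List.sorted (PySem.Set.ofList crisis_years) (fun x => x) false
  match ys with
  | [] => []
  | y0 :: _ =>
    let gaps := (ys.zip ys.tail).filter (fun p => p.2 ≠ p.1 + 1)
    let starts := y0 :: gaps.map (·.2)
    let ends := gaps.map (·.1) ++ [ys.getLastD y0]
    starts.zip ends

-- ===== PRECONDITION & SPEC =====
def Spec_crisis_episodes (crisis_years : List Int) (out : List (Int × Int)) : Prop := out = crisis_episodes_alt crisis_years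
instance (crisis_years : List Int) (out : List (Int × Int)) : Decidable (Spec_crisis_episodes crisis_years out) := by unfold Spec_crisis_episodes; infer_instance

-- ===== CLAIM (what is proved, stated in full; the proofs are below) =====
def Claim_equal_crisis_episodes : Prop := ∀ (crisis_years : List Int), Dom_crisis_episodes crisis_years → Spec_crisis_episodes crisis_years (crisis_episodes crisis_years)

-- ===== LEMMAS AND PROOFS =====

-- A's state machine as structural recursion from state (start, prev)
def pvSpans (s p : Int) : List Int → List (Int × Int)
  | [] => [(s, p)]
  | y :: r => if y = p + 1 then pvSpans s y r else (s, p) :: pvSpans y y r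

theorem pvFoldl_spans (rest : List Int) : ∀ (acc : List (Int × Int)) (s p : Int),
    (let st := rest.foldl
        (fun (st : List (Int × Int) × Int × Int) y =>
          if y = st.2.2 + 1 then (st.1, st.2.1, y)
          else (st.1 ++ [(st.2.1, st.2.2)], y, y))
        (acc, s, p)
     st.1 ++ [(st.2.1, st.2.2)]) = acc ++ pvSpans s p rest := by
  induction rest with
  | nil => intro acc s p; simp [pvSpans]
  | cons y r ih =>
    intro acc s p
    simp only [List.foldl_cons, pvSpans]
    by_cases h : y = p + 1
    · simp [h, ih]
    · simp [h, ih, List.append_assoc]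

theorem pvGetLastD_irrel (a : Int) (l : List Int) (d d' : Int) :
    (a :: l).getLast?.getD d = (a :: l).getLast?.getD d' := by
  cases h : (a :: l).getLast? with
  | none => exact absurd (List.getLast?_eq_none_iff.mp h) (by simp)
  | some x => rfl

-- B's zip-of-starts-and-ends equals A's state machine, for ANY tail
theorem pvSpans_eq_zip (rest : List Int) : ∀ (s p : Int),
    pvSpans s p rest =
      (s :: ((List.zip (p :: rest) rest).filter (fun q => q.2 ≠ q.1 + 1)).map (·.2)).zip
        (((List.zip (p :: rest) rest).filter (fun q => q.2 ≠ q.1 + 1)).map (·.1)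
          ++ [(p :: rest).getLastD p]) := by
  induction rest with
  | nil => intro s p; simp [pvSpans]
  | cons y r ih =>
    intro s p
    simp only [pvSpans, List.zip_cons_cons, List.filter_cons]
    by_cases h : y = p + 1
    · simp only [h]
      simp [ih]
      rw [pvGetLastD_irrel (p + 1) r (p + 1) p]
    · simp only [h]
      simp [ih, h]
      rw [pvGetLastD_irrel y r y p]

theorem pvSortedSet_nil_iff (xs : List Int) :
    PySem.List.sorted (PySem.Set.ofList xs) (fun x => x) false = [] ↔ xs = [] := by
  rw [PySem.List.sorted_eq_nil_iff]
  constructor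
  · intro h
    cases xs with
    | nil => rfl
    | cons a t =>
      exfalso
      have : a ∈ PySem.Set.ofList (a :: t) := by
        rw [PySem.Set.mem_ofList]; exact List.mem_cons_self
      simp [h] at this
  · intro h; subst h; rfl

-- ===== VERDICT (by name: the statement is the Claim_ definition above) =====
theorem crisis_episodes_spec : Claim_equal_crisis_episodes := by
  intro xs _
  unfold Spec_crisis_episodes crisis_episodes crisis_episodes_alt
  by_cases hx : xs = []
  · subst hx; rfl
  · simp only [hx, if_false]
    cases hys : PySem.List.sorted (PySem.Set.ofList xs) (fun x => x) false with
    | nil => exact absurd ((pvSortedSet_nil_iff xs).mp hys) hx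
    | cons y0 rest =>
      simp only
      rw [pvFoldl_spans rest [] y0 y0, List.nil_append, pvSpans_eq_zip rest y0 y0]
      simp
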